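-- pv_equiv track=rewrite | github.com/johntordj241/ProbaEdge | utils/performance_dashboard.py | _max_loss_streak
-- ===== SOURCE A (Python) =====
-- from typing import Dict, Iterable, Optional
--
-- def _max_loss_streak(outcomes: Iterable[Optional[bool]]) -> int:
--     streak = 0
--     max_streak = 0
--     for value in outcomes:
--         if value is True:
--             streak = 0
--         elif value is False:
--             streak += 1
--             if streak > max_streak:
--                 max_streak = streak
--     return max_streak
-- ===== SOURCE B (Python) =====
-- from itertools import groupby
--
-- def _max_loss_streak(outcomes):
--     vals = (v for v in outcomes if v is True or v is False)
--     return max((sum(1 for _ in g) for k, g in groupby(vals) if k is False), default=0)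
-- ===== Notes on version B (the rewrite author's own statement) =====
-- stated objective: idiomatic
-- what changed: Replaces the incremental streak/max counter pair with a declarative pipeline: filter out None, group consecutive equal outcomes (itertools.groupby), and take max of the False-group lengths with default 0.
import Mathlib
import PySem

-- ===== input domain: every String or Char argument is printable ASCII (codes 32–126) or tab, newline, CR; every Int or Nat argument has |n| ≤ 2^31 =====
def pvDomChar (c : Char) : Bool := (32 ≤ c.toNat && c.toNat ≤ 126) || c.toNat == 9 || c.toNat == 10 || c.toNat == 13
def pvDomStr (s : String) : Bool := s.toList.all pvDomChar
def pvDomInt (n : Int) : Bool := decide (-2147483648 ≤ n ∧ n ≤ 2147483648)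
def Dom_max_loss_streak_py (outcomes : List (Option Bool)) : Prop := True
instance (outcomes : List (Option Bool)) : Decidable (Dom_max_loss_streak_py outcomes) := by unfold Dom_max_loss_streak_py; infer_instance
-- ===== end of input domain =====

-- B replaces A's incremental streak/max counters with a filter + group-consecutive + max-of-False-group-lengths pipeline (idiomatic; same O(n) cost).

-- ===== PORT A =====
-- for-loop over (streak, max_streak), literal branch order: True resets, False increments and bumps max, None does nothing
-- loop body of A's for-loop
def pvStepA (st : Int × Int) (value : Option Bool) : Int × Int :=
  match value with
  | some true => (0, st.2)
  | some false =>
      let streak := st.1 + 1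
      (streak, if streak > st.2 then streak else st.2)
  | none => st

def max_loss_streak_py (outcomes : List (Option Bool)) : Int :=
  (outcomes.foldl pvStepA (0, 0)).2

-- ===== PORT B =====
-- hand port of itertools.groupby on a Bool list: list of (key, run length)
def pvGroups : List Bool → List (Bool × Int)
  | [] => []
  | b :: t =>
    match pvGroups t with
    | [] => [(b, 1)]
    | (k, n) :: gs => if b == k then (k, n + 1) :: gs else (b, 1) :: (k, n) :: gs

-- max(lengths of False groups, default=0)
def max_loss_streak_py_alt (outcomes : List (Option Bool)) : Int :=
  let vals : List Bool := outcomes.filterMap id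
  let lossLens := ((pvGroups vals).filter (fun g => g.1 == false)).map (fun g => g.2)
  lossLens.foldr max 0

-- ===== PRECONDITION & SPEC =====
def Spec_max_loss_streak_py (outcomes : List (Option Bool)) (out : Int) : Prop := out = max_loss_streak_py_alt outcomes
instance (outcomes : List (Option Bool)) (out : Int) : Decidable (Spec_max_loss_streak_py outcomes out) := by unfold Spec_max_loss_streak_py; infer_instance

-- ===== CLAIM (what is proved, stated in full; the proofs are below) =====
def Claim_equal_max_loss_streak_py : Prop := ∀ (outcomes : List (Option Bool)), Dom_max_loss_streak_py outcomes → Spec_max_loss_streak_py outcomes (max_loss_streak_py outcomes)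

-- ===== LEMMAS AND PROOFS =====

-- length of the leading run of b's
def pvLeadRun (b : Bool) : List Bool → Int
  | [] => 0
  | c :: t => if c == b then 1 + pvLeadRun b t else 0

-- B's value on a filtered list
def pvBMax (l : List Bool) : Int :=
  (((pvGroups l).filter (fun g => g.1 == false)).map (fun g => g.2)).foldr max 0

theorem pvGroups_cons_eq (b : Bool) (t : List Bool) :
    pvGroups (b :: t) = match pvGroups t with
      | [] => [(b, 1)]
      | (k, n) :: gs => if b == k then (k, n + 1) :: gs else (b, 1) :: (k, n) :: gs := rfl

theorem pvGroups_cons (t : List Bool) (b : Bool) :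
    ∃ gs, pvGroups (b :: t) = (b, 1 + pvLeadRun b t) :: gs := by
  induction t generalizing b with
  | nil => exact ⟨[], by simp [pvGroups, pvLeadRun]⟩
  | cons c t ih =>
    obtain ⟨gs, hgs⟩ := ih c
    by_cases h : b = c
    · subst h
      refine ⟨gs, ?_⟩
      rw [pvGroups_cons_eq, hgs]
      simp [pvLeadRun]
      ring
    · refine ⟨(c, 1 + pvLeadRun c t) :: gs, ?_⟩
      rw [pvGroups_cons_eq, hgs]
      simp [pvLeadRun, h]
      intro hcb
      exact absurd hcb.symm h

theorem pvFoldrMax_nonneg (l : List Int) : 0 ≤ l.foldr max 0 := by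
  induction l with
  | nil => simp
  | cons a t ih => simp [List.foldr]; omega

theorem pvBMax_nonneg (l : List Bool) : 0 ≤ pvBMax l := pvFoldrMax_nonneg _

theorem pvLeadRun_nonneg (b : Bool) (l : List Bool) : 0 ≤ pvLeadRun b l := by
  induction l with
  | nil => simp [pvLeadRun]
  | cons c t ih => simp only [pvLeadRun]; split <;> omega

theorem pvBMax_true (t : List Bool) : pvBMax (true :: t) = pvBMax t := by
  cases t with
  | nil => simp [pvBMax, pvGroups]
  | cons c t' =>
    obtain ⟨gs, hgs⟩ := pvGroups_cons t' c
    unfold pvBMax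
    rw [pvGroups_cons_eq true (c :: t'), hgs]
    cases c <;> simp

theorem pvBMax_false (t : List Bool) :
    pvBMax (false :: t) = max (1 + pvLeadRun false t) (pvBMax t) := by
  cases t with
  | nil => simp [pvBMax, pvGroups, pvLeadRun]
  | cons c t' =>
    obtain ⟨gs, hgs⟩ := pvGroups_cons t' c
    unfold pvBMax
    rw [pvGroups_cons_eq false (c :: t'), hgs]
    cases c with
    | true => simp [pvLeadRun]
    | false =>
      simp [pvLeadRun]
      omega

theorem pvLeadRun_le_bmax (l : List Bool) : pvLeadRun false l ≤ pvBMax l := by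
  induction l with
  | nil => simp [pvLeadRun, pvBMax, pvGroups]
  | cons c t ih =>
    cases c with
    | true =>
      have := pvBMax_nonneg (true :: t)
      simp [pvLeadRun]; omega
    | false =>
      have h := pvBMax_false t
      simp [pvLeadRun]; omega

theorem pv_main (xs : List (Option Bool)) :
    ∀ (s m : Int), 0 ≤ s → s ≤ m →
      (xs.foldl pvStepA (s, m)).2
      = max m (max (s + pvLeadRun false (xs.filterMap id)) (pvBMax (xs.filterMap id))) := by
  induction xs with
  | nil =>
    intro s m hs hm
    simp [pvLeadRun, pvBMax, pvGroups]
    omega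
  | cons v t ih =>
    intro s m hs hm
    cases v with
    | none =>
      have h := ih s m hs hm
      simp only [List.foldl_cons, pvStepA, List.filterMap_cons, id_eq] at h ⊢
      exact h
    | some b =>
      cases b with
      | true =>
        have h := ih 0 m le_rfl (hs.trans hm)
        simp only [List.foldl_cons, pvStepA, List.filterMap_cons, id_eq] at h ⊢
        simp only [pvLeadRun, pvBMax_true] at h ⊢
        have hle := pvLeadRun_le_bmax (t.filterMap fun x => x)
        have hnn := pvBMax_nonneg (t.filterMap fun x => x)
        simp at h ⊢
        omega
      | false =>
        have hite : (if s + 1 > m then s + 1 else m) = max (s + 1) m := by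
          split <;> omega
        have h := ih (s + 1) (max (s + 1) m) (by omega) (by omega)
        simp only [List.foldl_cons, pvStepA, List.filterMap_cons, id_eq] at h ⊢
        simp only [pvLeadRun, pvBMax_false] at h ⊢
        have hnn := pvLeadRun_nonneg false (t.filterMap fun x => x)
        have hbm := pvBMax_nonneg (t.filterMap fun x => x)
        rw [hite, h]
        simp only [beq_self_eq_true, if_true]
        omega

-- ===== VERDICT (by name: the statement is the Claim_ definition above) =====
theorem max_loss_streak_py_spec : Claim_equal_max_loss_streak_py := by
  intro outcomes _
  unfold Spec_max_loss_streak_py max_loss_streak_py max_loss_streak_py_alt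
  have h := pv_main outcomes 0 0 le_rfl le_rfl
  have hle := pvLeadRun_le_bmax (outcomes.filterMap id)
  have hnn := pvBMax_nonneg (outcomes.filterMap id)
  rw [h]
  show _ = pvBMax (outcomes.filterMap id)
  omega
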